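-- pv_equiv track=rewrite | github.com/Locke637/vdn_magents | common/common.py | find_neighbor_pos
-- ===== SOURCE A (Python) =====
-- def find_neighbor_pos(pos, view_field):
--     num_neighbor = 3
--     # view_field = 5
--     nei_index = {}
--     nei_pos = {}
--     for id, p in enumerate(pos):
--         nei_index[id] = []
--         nei_pos[id] = []
--         d_p_all = {}
--         temp_pos = {}
--         for index, nei_p in enumerate(pos):
--             d_x = abs(p[0] - nei_p[0])
--             d_y = abs(p[1] - nei_p[1])
--             if d_x < view_field and d_y < view_field and index != id:
--                 d_p = d_x + d_y
--                 d_p_all[index] = d_p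
--                 temp_pos[index] = [nei_p[0] - p[0], nei_p[1] - p[1]]
--         if d_p_all:
--             d_p_all = sorted(d_p_all.items(), key=lambda item: item[1])
--             count = 0
--             for idpos in d_p_all:
--                 if count < num_neighbor:
--                     nei_index[id].append(idpos[0])
--                     nei_pos[id].append(temp_pos[idpos[0]])
--                     count += 1
--                 else:
--                     break
--
--     return nei_index, nei_pos
-- ===== SOURCE B (Python) =====
-- def _ins3(best, t):
--     # insert t into best (sorted by (dist, index)) and keep only the 3 smallest
--     for k in range(len(best)):
--         if t[0] < best[k][0] or (t[0] == best[k][0] and t[1] < best[k][1]):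
--             return (best[:k] + [t] + best[k:])[:3]
--     return (best + [t])[:3]
--
--
-- def find_neighbor_pos(pos, view_field):
--     nei_index = {}
--     nei_pos = {}
--     for i, p in enumerate(pos):
--         best = []  # up to 3 candidates (dist, index, rel_pos), kept sorted by (dist, index)
--         for j, q in enumerate(pos):
--             if j == i:
--                 continue
--             dx = q[0] - p[0]
--             dy = q[1] - p[1]
--             if abs(dx) < view_field and abs(dy) < view_field:
--                 best = _ins3(best, (abs(dx) + abs(dy), j, [dx, dy]))
--         nei_index[i] = [t[1] for t in best]
--         nei_pos[i] = [t[2] for t in best]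
--     return nei_index, nei_pos
-- ===== Notes on version B (the rewrite author's own statement) =====
-- stated objective: alternative
-- what changed: Per agent, A builds two dicts over all candidates and stably sorts the whole candidate set by distance before taking 3; B does a single pass keeping only the 3 smallest (dist, index) candidates in a bounded insertion buffer, with no dicts and no full sort.
import Mathlib
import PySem

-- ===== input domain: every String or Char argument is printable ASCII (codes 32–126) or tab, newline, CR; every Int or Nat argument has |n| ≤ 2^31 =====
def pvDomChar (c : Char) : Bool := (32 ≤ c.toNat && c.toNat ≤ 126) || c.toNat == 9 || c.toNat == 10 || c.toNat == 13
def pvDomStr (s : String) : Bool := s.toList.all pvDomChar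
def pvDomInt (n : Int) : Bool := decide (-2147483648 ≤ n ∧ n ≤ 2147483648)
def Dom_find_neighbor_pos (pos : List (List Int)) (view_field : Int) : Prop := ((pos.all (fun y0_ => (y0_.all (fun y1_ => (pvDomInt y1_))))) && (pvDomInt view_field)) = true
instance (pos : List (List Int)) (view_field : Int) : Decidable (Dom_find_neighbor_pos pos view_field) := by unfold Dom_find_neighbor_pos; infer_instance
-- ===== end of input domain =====

-- B replaces A's per-agent sort of all window candidates by a single pass keeping the 3
-- (dist, index)-smallest candidates in a bounded insertion buffer (objective: alternative).

-- ===== PORT A =====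
-- Python's two dicts d_p_all / temp_pos only ever receive FRESH integer keys, so they are
-- ported as association lists in insertion order (insert = append, .items() = the list,
-- temp_pos[k] = first match via List.lookup).
-- The `for idpos in d_p_all: if count < 3 … else break` loop of A:
def pvTakeLoop (tp : List (Int × List Int)) : List (Int × Int) → Int → List Int × List (List Int) → List Int × List (List Int)
  | [], _, acc => acc
  | x :: xs, count, acc =>
    if count < 3 then
      pvTakeLoop tp xs (count + 1) (acc.1 ++ [x.1], acc.2 ++ [(List.lookup x.1 tp).getD []])
    else acc

-- p[0] / p[1]: Pre_ guarantees every row has ≥ 2 entries, so the pyGetD default 0 is unreachable.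
def find_neighbor_pos (pos : List (List Int)) (view_field : Int) : (List (Int × List Int)) × (List (Int × List (List Int))) :=
  (PySem.List.enumerate pos).foldl (fun acc idp =>
    let id := idp.1
    let p := idp.2
    let st := (PySem.List.enumerate pos).foldl
      (fun (st : List (Int × Int) × List (Int × List Int)) iq =>
        let index := iq.1
        let nei_p := iq.2
        let d_x := |PySem.List.pyGetD p 0 0 - PySem.List.pyGetD nei_p 0 0|
        let d_y := |PySem.List.pyGetD p 1 0 - PySem.List.pyGetD nei_p 1 0|
        if d_x < view_field ∧ d_y < view_field ∧ index ≠ id then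
          (st.1 ++ [(index, d_x + d_y)],
           st.2 ++ [(index, [PySem.List.pyGetD nei_p 0 0 - PySem.List.pyGetD p 0 0,
                             PySem.List.pyGetD nei_p 1 0 - PySem.List.pyGetD p 1 0])])
        else st) ([], [])
    let entry :=
      if st.1.isEmpty then (([], []) : List Int × List (List Int))
      else pvTakeLoop st.2 (PySem.List.sorted st.1 (fun item => item.2)) 0 ([], [])
    (acc.1 ++ [(id, entry.1)], acc.2 ++ [(id, entry.2)])) ([], [])

-- ===== PORT B =====
-- _ins3 of Source B: insert into the (dist, index)-sorted buffer, keep the 3 smallest.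
def pvInsAux (t : Int × Int × List Int) : List (Int × Int × List Int) → List (Int × Int × List Int)
  | [] => [t]
  | u :: us => if t.1 < u.1 ∨ (t.1 = u.1 ∧ t.2.1 < u.2.1) then t :: u :: us else u :: pvInsAux t us

def pvIns3 (best : List (Int × Int × List Int)) (t : Int × Int × List Int) : List (Int × Int × List Int) :=
  (pvInsAux t best).take 3

def find_neighbor_pos_alt (pos : List (List Int)) (view_field : Int) : (List (Int × List Int)) × (List (Int × List (List Int))) :=
  (PySem.List.enumerate pos).foldl (fun acc ip =>
    let i := ip.1
    let p := ip.2
    let best := (PySem.List.enumerate pos).foldl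
      (fun (best : List (Int × Int × List Int)) jq =>
        if jq.1 = i then best
        else
          let dx := PySem.List.pyGetD jq.2 0 0 - PySem.List.pyGetD p 0 0
          let dy := PySem.List.pyGetD jq.2 1 0 - PySem.List.pyGetD p 1 0
          if |dx| < view_field ∧ |dy| < view_field then pvIns3 best (|dx| + |dy|, jq.1, [dx, dy])
          else best) []
    (acc.1 ++ [(i, best.map (fun t => t.2.1))], acc.2 ++ [(i, best.map (fun t => t.2.2))])) ([], [])

-- ===== PRECONDITION & SPEC =====
-- Pre_ excludes exactly the inputs on which the Python A raises IndexError: a row of pos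
-- with fewer than two coordinates (p[0] / p[1]).
def Pre_find_neighbor_pos (pos : List (List Int)) (view_field : Int) : Prop :=
  ∀ r ∈ pos, 2 ≤ r.length
instance (pos : List (List Int)) (view_field : Int) : Decidable (Pre_find_neighbor_pos pos view_field) := by unfold Pre_find_neighbor_pos; infer_instance
def pvWitness_find_neighbor_pos : List (List Int) × Int := ([[0, 0], [1, 1], [4, 0]], 3)

def Spec_find_neighbor_pos (pos : List (List Int)) (view_field : Int) (out : (List (Int × List Int)) × (List (Int × List (List Int)))) : Prop := out = find_neighbor_pos_alt pos view_field
instance (pos : List (List Int)) (view_field : Int) (out : (List (Int × List Int)) × (List (Int × List (List Int)))) : Decidable (Spec_find_neighbor_pos pos view_field out) := by unfold Spec_find_neighbor_pos; infer_instance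

-- ===== CLAIM (what is proved, stated in full; the proofs are below) =====
def Claim_equal_find_neighbor_pos : Prop := ∀ (pos : List (List Int)) (view_field : Int), Dom_find_neighbor_pos pos view_field → Pre_find_neighbor_pos pos view_field → Spec_find_neighbor_pos pos view_field (find_neighbor_pos pos view_field)

-- ===== LEMMAS AND PROOFS =====

-- the candidate triple (distance, index, relative position) of agent p and entry jq of enumerate(pos)
def pvTrip (p : List Int) (jq : Int × List Int) : Int × Int × List Int :=
  (|PySem.List.pyGetD p 0 0 - PySem.List.pyGetD jq.2 0 0| + |PySem.List.pyGetD p 1 0 - PySem.List.pyGetD jq.2 1 0|,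
   jq.1,
   [PySem.List.pyGetD jq.2 0 0 - PySem.List.pyGetD p 0 0, PySem.List.pyGetD jq.2 1 0 - PySem.List.pyGetD p 1 0])

-- agent i's candidate list, in index order
def pvT (pos : List (List Int)) (view_field : Int) (i : Int) (p : List Int) : List (Int × Int × List Int) :=
  ((PySem.List.enumerate pos).filter (fun jq =>
    decide (|PySem.List.pyGetD p 0 0 - PySem.List.pyGetD jq.2 0 0| < view_field ∧
            |PySem.List.pyGetD p 1 0 - PySem.List.pyGetD jq.2 1 0| < view_field ∧ jq.1 ≠ i))).map (pvTrip p)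

-- full insertion sort with B's insertion
def pvSortT (T : List (Int × Int × List Int)) : List (Int × Int × List Int) :=
  T.foldl (fun acc t => pvInsAux t acc) []

lemma pv_foldl_if_pair {α β γ : Type} (c : α → Prop) [DecidablePred c] (f : α → β) (g : α → γ) :
    ∀ (l : List α) (a : List β) (b : List γ),
    l.foldl (fun st x => if c x then (st.1 ++ [f x], st.2 ++ [g x]) else st) (a, b)
      = (a ++ (l.filter (fun x => decide (c x))).map f, b ++ (l.filter (fun x => decide (c x))).map g) := by
  intro l
  induction l with
  | nil => intro a b; simp
  | cons x xs ih =>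
    intro a b
    by_cases h : c x
    · simp [h, ih, List.append_assoc]
    · simp [h, ih]

lemma pv_foldl_if_upd {α σ : Type} (c : α → Prop) [DecidablePred c] (upd : σ → α → σ) :
    ∀ (l : List α) (init : σ),
    l.foldl (fun s x => if c x then upd s x else s) init
      = ((l.filter (fun x => decide (c x))).foldl upd init) := by
  intro l
  induction l with
  | nil => intro init; simp
  | cons x xs ih =>
    intro init
    by_cases h : c x
    · simp [h, ih]
    · simp [h, ih]

lemma pv_insAux_take (t : Int × Int × List Int) :
    ∀ (l : List (Int × Int × List Int)) (n : Nat),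
    (pvInsAux t l).take n = (pvInsAux t (l.take n)).take n := by
  intro l
  induction l with
  | nil => intro n; simp [pvInsAux]
  | cons u us ih =>
    intro n
    cases n with
    | zero => simp
    | succ m =>
      by_cases h : t.1 < u.1 ∨ (t.1 = u.1 ∧ t.2.1 < u.2.1)
      · simp only [pvInsAux, if_pos h, List.take_succ_cons]
        congr 1
        cases m with
        | zero => rfl
        | succ k =>
          simp only [List.take_succ_cons, List.take_take]
          have hm : min k (k + 1) = k := by omega
          rw [hm]
      · simp only [pvInsAux, if_neg h, List.take_succ_cons, ih]

lemma pv_foldl_ins3 :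
    ∀ (T full : List (Int × Int × List Int)),
    T.foldl pvIns3 (full.take 3) = (T.foldl (fun acc t => pvInsAux t acc) full).take 3 := by
  intro T
  induction T with
  | nil => intro full; rfl
  | cons t ts ih =>
    intro full
    simp only [List.foldl_cons]
    have h1 : pvIns3 (full.take 3) t = (pvInsAux t full).take 3 :=
      (pv_insAux_take t full 3).symm
    rw [h1, ih]

lemma pv_mem_insAux (u t : Int × Int × List Int) :
    ∀ (l : List (Int × Int × List Int)), u ∈ pvInsAux t l → u = t ∨ u ∈ l := by
  intro l
  induction l with
  | nil => intro h; simp [pvInsAux] at h; exact Or.inl h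
  | cons v vs ih =>
    intro h
    by_cases hc : t.1 < v.1 ∨ (t.1 = v.1 ∧ t.2.1 < v.2.1)
    · simp only [pvInsAux, if_pos hc, List.mem_cons] at h
      rcases h with h | h | h
      · exact Or.inl h
      · exact Or.inr (by simp [h])
      · exact Or.inr (by simp [h])
    · simp only [pvInsAux, if_neg hc, List.mem_cons] at h
      rcases h with h | h
      · exact Or.inr (by simp [h])
      · rcases ih h with h2 | h2
        · exact Or.inl h2
        · exact Or.inr (by simp [h2])

lemma pv_mem_sort (u : Int × Int × List Int) :
    ∀ (T acc : List (Int × Int × List Int)),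
    u ∈ T.foldl (fun a t => pvInsAux t a) acc → u ∈ acc ∨ u ∈ T := by
  intro T
  induction T with
  | nil => intro acc h; exact Or.inl h
  | cons t ts ih =>
    intro acc h
    simp only [List.foldl_cons] at h
    rcases ih _ h with h2 | h2
    · rcases pv_mem_insAux u t acc h2 with h3 | h3
      · exact Or.inr (by simp [h3])
      · exact Or.inl h3
    · exact Or.inr (by simp [h2])

lemma pv_insertBy_map (t : Int × Int × List Int) :
    ∀ (acc : List (Int × Int × List Int)), (∀ u ∈ acc, u.2.1 < t.2.1) →
    PySem.List.insertBy (fun a b => decide (a.2 < b.2)) (t.2.1, t.1) (acc.map (fun u => (u.2.1, u.1)))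
      = (pvInsAux t acc).map (fun u => (u.2.1, u.1)) := by
  intro acc
  induction acc with
  | nil => intro _; simp [PySem.List.insertBy, pvInsAux]
  | cons u us ih =>
    intro hdom
    have hu : u.2.1 < t.2.1 := hdom u (by simp)
    by_cases hlt : t.1 < u.1
    · simp [PySem.List.insertBy, pvInsAux, hlt]
    · have hc : ¬(t.1 < u.1 ∨ (t.1 = u.1 ∧ t.2.1 < u.2.1)) := by omega
      simp only [List.map_cons, PySem.List.insertBy, pvInsAux, if_neg hc]
      rw [if_neg (by simpa using hlt)]
      rw [ih (fun v hv => hdom v (by simp [hv]))]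

lemma pv_sort_map :
    ∀ (T acc : List (Int × Int × List Int)),
    T.Pairwise (fun a b => a.2.1 < b.2.1) → (∀ u ∈ acc, ∀ s ∈ T, u.2.1 < s.2.1) →
    (T.map (fun u => (u.2.1, u.1))).foldl
        (fun a x => PySem.List.insertBy (fun a b => decide (a.2 < b.2)) x a) (acc.map (fun u => (u.2.1, u.1)))
      = (T.foldl (fun a t => pvInsAux t a) acc).map (fun u => (u.2.1, u.1)) := by
  intro T
  induction T with
  | nil => intro acc _ _; rfl
  | cons t ts ih =>
    intro acc hpw hdom
    simp only [List.map_cons, List.foldl_cons]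
    rw [pv_insertBy_map t acc (fun u hu => hdom u hu t (by simp))]
    rw [ih (pvInsAux t acc) hpw.of_cons ?_]
    intro u hu s hs
    rcases pv_mem_insAux u t acc hu with h | h
    · subst h
      exact (List.pairwise_cons.mp hpw).1 s hs
    · exact hdom u h s (by simp [hs])

lemma pv_lookup_tp :
    ∀ (T : List (Int × Int × List Int)), T.Pairwise (fun a b => a.2.1 < b.2.1) →
    ∀ t ∈ T, List.lookup t.2.1 (T.map (fun u => (u.2.1, u.2.2))) = some t.2.2 := by
  intro T
  induction T with
  | nil => intro _ t ht; simp at ht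
  | cons u us ih =>
    intro hpw t ht
    rcases List.mem_cons.mp ht with h | h
    · subst h
      simp [List.lookup]
    · have hut : u.2.1 < t.2.1 := (List.pairwise_cons.mp hpw).1 t h
      have hne : (t.2.1 == u.2.1) = false := by
        simp only [beq_eq_false_iff_ne, ne_eq]
        omega
      simp only [List.map_cons, List.lookup, hne]
      exact ih hpw.of_cons t h

lemma pv_takeLoop_eq (tp : List (Int × List Int)) :
    ∀ (l : List (Int × Int)) (count : Int) (acc : List Int × List (List Int)), 0 ≤ count →
    pvTakeLoop tp l count acc
      = (acc.1 ++ (l.take (3 - count).toNat).map (fun x => x.1),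
         acc.2 ++ (l.take (3 - count).toNat).map (fun x => (List.lookup x.1 tp).getD [])) := by
  intro l
  induction l with
  | nil => intro count acc h; simp [pvTakeLoop]
  | cons x xs ih =>
    intro count acc h
    by_cases hc : count < 3
    · simp only [pvTakeLoop, if_pos hc]
      rw [ih (count + 1) _ (by omega)]
      have h3 : (3 - count).toNat = (3 - (count + 1)).toNat + 1 := by omega
      rw [h3, List.take_succ_cons]
      simp [List.append_assoc]
    · simp only [pvTakeLoop, if_neg hc]
      have h3 : (3 - count).toNat = 0 := by omega
      rw [h3]
      simp

lemma pv_pairwise_T (pos : List (List Int)) (view_field : Int) (i : Int) (p : List Int) :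
    (pvT pos view_field i p).Pairwise (fun a b => a.2.1 < b.2.1) := by
  unfold pvT
  refine List.Pairwise.map _ (fun a b hab => hab) ?_
  exact (PySem.List.pairwise_lt_enumerate pos 0).filter _

-- the two per-agent computations agree
lemma pv_entry_eq (pos : List (List Int)) (view_field : Int) (i : Int) (p : List Int) :
    (let st := (PySem.List.enumerate pos).foldl
      (fun (st : List (Int × Int) × List (Int × List Int)) iq =>
        let index := iq.1
        let nei_p := iq.2
        let d_x := |PySem.List.pyGetD p 0 0 - PySem.List.pyGetD nei_p 0 0|
        let d_y := |PySem.List.pyGetD p 1 0 - PySem.List.pyGetD nei_p 1 0|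
        if d_x < view_field ∧ d_y < view_field ∧ index ≠ i then
          (st.1 ++ [(index, d_x + d_y)],
           st.2 ++ [(index, [PySem.List.pyGetD nei_p 0 0 - PySem.List.pyGetD p 0 0,
                             PySem.List.pyGetD nei_p 1 0 - PySem.List.pyGetD p 1 0])])
        else st) ([], [])
     if st.1.isEmpty then (([], []) : List Int × List (List Int))
     else pvTakeLoop st.2 (PySem.List.sorted st.1 (fun item => item.2)) 0 ([], []))
    = (((PySem.List.enumerate pos).foldl
      (fun (best : List (Int × Int × List Int)) jq =>
        if jq.1 = i then best
        else
          let dx := PySem.List.pyGetD jq.2 0 0 - PySem.List.pyGetD p 0 0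
          let dy := PySem.List.pyGetD jq.2 1 0 - PySem.List.pyGetD p 1 0
          if |dx| < view_field ∧ |dy| < view_field then pvIns3 best (|dx| + |dy|, jq.1, [dx, dy])
          else best) []).map (fun t => t.2.1),
       ((PySem.List.enumerate pos).foldl
      (fun (best : List (Int × Int × List Int)) jq =>
        if jq.1 = i then best
        else
          let dx := PySem.List.pyGetD jq.2 0 0 - PySem.List.pyGetD p 0 0
          let dy := PySem.List.pyGetD jq.2 1 0 - PySem.List.pyGetD p 1 0
          if |dx| < view_field ∧ |dy| < view_field then pvIns3 best (|dx| + |dy|, jq.1, [dx, dy])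
          else best) []).map (fun t => t.2.2)) := by
  have hpw := pv_pairwise_T pos view_field i p
  have hA2 : (PySem.List.enumerate pos).foldl
      (fun (st : List (Int × Int) × List (Int × List Int)) iq =>
        let index := iq.1
        let nei_p := iq.2
        let d_x := |PySem.List.pyGetD p 0 0 - PySem.List.pyGetD nei_p 0 0|
        let d_y := |PySem.List.pyGetD p 1 0 - PySem.List.pyGetD nei_p 1 0|
        if d_x < view_field ∧ d_y < view_field ∧ index ≠ i then
          (st.1 ++ [(index, d_x + d_y)],
           st.2 ++ [(index, [PySem.List.pyGetD nei_p 0 0 - PySem.List.pyGetD p 0 0,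
                             PySem.List.pyGetD nei_p 1 0 - PySem.List.pyGetD p 1 0])])
        else st) ([], [])
      = ((pvT pos view_field i p).map (fun u => (u.2.1, u.1)),
         (pvT pos view_field i p).map (fun u => (u.2.1, u.2.2))) := by
    have hA := pv_foldl_if_pair
      (c := fun iq : Int × List Int =>
        |PySem.List.pyGetD p 0 0 - PySem.List.pyGetD iq.2 0 0| < view_field ∧
        |PySem.List.pyGetD p 1 0 - PySem.List.pyGetD iq.2 1 0| < view_field ∧ iq.1 ≠ i)
      (f := fun iq => (iq.1, |PySem.List.pyGetD p 0 0 - PySem.List.pyGetD iq.2 0 0| +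
                             |PySem.List.pyGetD p 1 0 - PySem.List.pyGetD iq.2 1 0|))
      (g := fun iq => (iq.1, [PySem.List.pyGetD iq.2 0 0 - PySem.List.pyGetD p 0 0,
                              PySem.List.pyGetD iq.2 1 0 - PySem.List.pyGetD p 1 0]))
      (PySem.List.enumerate pos) [] []
    refine hA.trans ?_
    unfold pvT
    rw [List.map_map, List.map_map]
    rfl
  have hbfun : (fun (best : List (Int × Int × List Int)) (jq : Int × List Int) =>
        if jq.1 = i then best
        else
          let dx := PySem.List.pyGetD jq.2 0 0 - PySem.List.pyGetD p 0 0
          let dy := PySem.List.pyGetD jq.2 1 0 - PySem.List.pyGetD p 1 0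
          if |dx| < view_field ∧ |dy| < view_field then pvIns3 best (|dx| + |dy|, jq.1, [dx, dy])
          else best)
      = (fun best jq =>
        if |PySem.List.pyGetD p 0 0 - PySem.List.pyGetD jq.2 0 0| < view_field ∧
           |PySem.List.pyGetD p 1 0 - PySem.List.pyGetD jq.2 1 0| < view_field ∧ jq.1 ≠ i
        then pvIns3 best (pvTrip p jq) else best) := by
    funext best jq
    have e1 : |PySem.List.pyGetD p 0 0 - PySem.List.pyGetD jq.2 0 0|
        = |PySem.List.pyGetD jq.2 0 0 - PySem.List.pyGetD p 0 0| := abs_sub_comm _ _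
    have e2 : |PySem.List.pyGetD p 1 0 - PySem.List.pyGetD jq.2 1 0|
        = |PySem.List.pyGetD jq.2 1 0 - PySem.List.pyGetD p 1 0| := abs_sub_comm _ _
    by_cases h1 : jq.1 = i
    · simp [h1]
    · simp only [if_neg h1]
      by_cases h2 : |PySem.List.pyGetD jq.2 0 0 - PySem.List.pyGetD p 0 0| < view_field ∧
                    |PySem.List.pyGetD jq.2 1 0 - PySem.List.pyGetD p 1 0| < view_field
      · simp only [pvTrip, e1, e2]
        rw [if_pos h2, if_pos ⟨h2.1, h2.2, h1⟩]
      · rw [if_neg h2, if_neg (by simp only [e1, e2]; tauto)]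
  have hB2 : (PySem.List.enumerate pos).foldl
      (fun (best : List (Int × Int × List Int)) jq =>
        if jq.1 = i then best
        else
          let dx := PySem.List.pyGetD jq.2 0 0 - PySem.List.pyGetD p 0 0
          let dy := PySem.List.pyGetD jq.2 1 0 - PySem.List.pyGetD p 1 0
          if |dx| < view_field ∧ |dy| < view_field then pvIns3 best (|dx| + |dy|, jq.1, [dx, dy])
          else best) []
      = (pvSortT (pvT pos view_field i p)).take 3 := by
    rw [hbfun]
    rw [pv_foldl_if_upd
      (c := fun jq : Int × List Int =>
        |PySem.List.pyGetD p 0 0 - PySem.List.pyGetD jq.2 0 0| < view_field ∧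
        |PySem.List.pyGetD p 1 0 - PySem.List.pyGetD jq.2 1 0| < view_field ∧ jq.1 ≠ i)
      (upd := fun best jq => pvIns3 best (pvTrip p jq)) (PySem.List.enumerate pos) []]
    rw [← List.foldl_map]
    exact pv_foldl_ins3 (pvT pos view_field i p) []
  simp only [hA2, hB2]
  by_cases hT : pvT pos view_field i p = []
  · rw [hT]
    simp [pvSortT]
  · rw [if_neg (by simp [hT])]
    have hs : PySem.List.sorted ((pvT pos view_field i p).map (fun u => (u.2.1, u.1)))
        (fun item => item.2)
        = (pvSortT (pvT pos view_field i p)).map (fun u => (u.2.1, u.1)) := by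
      rw [PySem.List.sorted_eq_foldl_insertBy]
      exact pv_sort_map (pvT pos view_field i p) [] hpw (by simp)
    rw [hs]
    rw [pv_takeLoop_eq ((pvT pos view_field i p).map (fun u => (u.2.1, u.2.2)))
      ((pvSortT (pvT pos view_field i p)).map (fun u => (u.2.1, u.1))) 0 ([], []) (by norm_num)]
    have h30 : ((3 : Int) - 0).toNat = 3 := by decide
    rw [h30, ← List.map_take, List.map_map, List.map_map]
    refine congrArg₂ Prod.mk ?_ ?_
    · simp only [List.nil_append]
      rfl
    · simp only [List.nil_append]
      apply List.map_congr_left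
      intro t ht
      have htT : t ∈ pvT pos view_field i p := by
        rcases pv_mem_sort t (pvT pos view_field i p) [] (List.mem_of_mem_take ht) with h | h
        · simp at h
        · exact h
      show (List.lookup t.2.1 ((pvT pos view_field i p).map (fun u => (u.2.1, u.2.2)))).getD [] = t.2.2
      rw [pv_lookup_tp (pvT pos view_field i p) hpw t htT]
      rfl

-- ===== VERDICT (by name: the statement is the Claim_ definition above) =====
theorem find_neighbor_pos_spec : Claim_equal_find_neighbor_pos := by
  intro pos view_field _ _
  unfold Spec_find_neighbor_pos find_neighbor_pos find_neighbor_pos_alt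
  congr 1
  funext acc idp
  have h := pv_entry_eq pos view_field idp.1 idp.2
  simp only at h ⊢
  rw [h]
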